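-- pv_equiv track=rewrite | github.com/DeleySelem/kvbrwpns | MiBrute/mibrute34.py | generate_next_phrase
-- ===== SOURCE A (Python) =====
-- def get_next_char(current_char, unique_chars):
--     """Get the next character from unique characters list."""
--     if current_char in unique_chars:
--         current_index = unique_chars.index(current_char)
--         return unique_chars[(current_index + 1) % len(unique_chars)]
--     return current_char  # Fallback
--
-- def get_next_digit(current_digit, unique_digits):
--     """Get the next digit from unique digits list."""
--     if current_digit in unique_digits:
--         current_index = unique_digits.index(current_digit)
--         return unique_digits[(current_index + 1) % len(unique_digits)]
--     return current_digit  # Fallback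
--
-- def skip_characters(phrase, phrases):
--     """Skip letters and increment numbers based on characters at the same index in the phrases."""
--     next_phrase = []
--     length = len(phrase)
--
--     for i in range(length):
--         chars_at_index = [p[i] for p in phrases if len(p) > i]  # Get all chars at this index
--         unique_chars = sorted(set(char for char in chars_at_index if char.isalpha()))
--         unique_digits = sorted(set(char for char in chars_at_index if char.isdigit()))
--
--         if phrase[i].isalpha():
--             next_char = get_next_char(phrase[i], unique_chars)
--             next_phrase.append(next_char)
--         elif phrase[i].isdigit():
--             next_digit = get_next_digit(phrase[i], unique_digits)
--             next_phrase.append(next_digit)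
--         else:
--             next_phrase.append(phrase[i])  # Keep other characters unchanged
--
--     return ''.join(next_phrase)
--
-- def generate_next_phrase(phrases, logic):
--     """Generate the next phrase based on the current logic."""
--     if not phrases:
--         return ""
--
--     base_phrase = phrases[0]
--     next_phrase = []
--
--     for i in range(len(base_phrase)):
--         char = base_phrase[i]
--         # Skip characters using the skip_characters function
--         next_phrase.append(char)  # Placeholder, will be updated
--
--     next_phrase_str = skip_characters(''.join(next_phrase), phrases)
--
--     # Ensure the generated phrase doesn't already exist
--     attempts = 0
--     while next_phrase_str in phrases and attempts < 10:  # Limit attempts to avoid infinite loop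
--         next_phrase_str = skip_characters(''.join(next_phrase), phrases)
--         attempts += 1
--
--     return next_phrase_str
-- ===== SOURCE B (Python) =====
-- def generate_next_phrase(phrases, logic):
--     """Generate the next phrase based on the current logic."""
--     if not phrases:
--         return ""
--     # One pass: transpose all phrases into columns.
--     columns = {}
--     for p in phrases:
--         for i, c in enumerate(p):
--             columns.setdefault(i, []).append(c)
--     # Second pass over the base phrase, using a prebuilt cyclic-successor table per column.
--     out = []
--     for i, ch in enumerate(phrases[0]):
--         col = columns.get(i, [])
--         if ch.isalpha():
--             u = sorted(set(c for c in col if c.isalpha()))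
--             table = dict(zip(u, u[1:] + u[:1]))
--             out.append(table.get(ch, ch))
--         elif ch.isdigit():
--             u = sorted(set(c for c in col if c.isdigit()))
--             table = dict(zip(u, u[1:] + u[:1]))
--             out.append(table.get(ch, ch))
--         else:
--             out.append(ch)
--     return ''.join(out)
-- ===== Notes on version B (the rewrite author's own statement) =====
-- stated objective: faster
-- what changed: B transposes all phrases into a column dict in one pass and builds a prebuilt cyclic-successor table (dict(zip(u, u[1:]+u[:1]))) per column, replacing A's per-position rescan of all phrases with list.index/modular indexing and its no-op retry while loop.
import Mathlib
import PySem

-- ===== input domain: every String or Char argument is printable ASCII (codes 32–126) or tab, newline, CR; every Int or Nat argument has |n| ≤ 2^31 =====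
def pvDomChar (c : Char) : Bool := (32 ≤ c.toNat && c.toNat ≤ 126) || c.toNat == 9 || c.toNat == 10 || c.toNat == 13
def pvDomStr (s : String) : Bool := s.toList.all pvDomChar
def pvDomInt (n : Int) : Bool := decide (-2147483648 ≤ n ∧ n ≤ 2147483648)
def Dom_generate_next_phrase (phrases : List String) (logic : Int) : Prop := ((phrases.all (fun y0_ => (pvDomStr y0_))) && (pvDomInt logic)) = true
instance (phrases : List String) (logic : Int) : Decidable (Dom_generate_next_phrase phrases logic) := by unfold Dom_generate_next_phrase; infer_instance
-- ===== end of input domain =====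

-- B transposes phrases into a column dict once and applies a prebuilt cyclic-successor table per
-- column, dropping A's per-position rescan of all phrases and its no-op retry loop (objective: faster).


-- ===== PORT A =====
def pv_get_next_char (c : Char) (unique_chars : List Char) : Char :=
  if c ∈ unique_chars then
    match PySem.List.index? unique_chars c with
    | some ci => (PySem.List.pyGet? unique_chars (PySem.Int.mod ((ci : Int) + 1) (unique_chars.length : Int))).getD c
    | none => c
  else c

def pv_get_next_digit (c : Char) (unique_digits : List Char) : Char :=
  if c ∈ unique_digits then
    match PySem.List.index? unique_digits c with
    | some ci => (PySem.List.pyGet? unique_digits (PySem.Int.mod ((ci : Int) + 1) (unique_digits.length : Int))).getD c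
    | none => c
  else c

def pv_skip_characters (phrase : String) (phrases : List String) : String :=
  let cs := phrase.toList
  String.ofList ((List.range cs.length).foldl (fun acc i =>
    let chars_at := phrases.flatMap (fun p => if i < p.toList.length then [p.toList.getD i ' '] else [])
    let unique_chars := PySem.List.sorted (PySem.Set.ofList (chars_at.filter (fun ch => PySem.Chars.isalpha ch))) (fun x => x) false
    let unique_digits := PySem.List.sorted (PySem.Set.ofList (chars_at.filter (fun ch => PySem.Chars.isdigit ch))) (fun x => x) false
    let c := cs.getD i ' '
    acc ++ [if PySem.Chars.isalpha c then pv_get_next_char c unique_chars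
            else if PySem.Chars.isdigit c then pv_get_next_digit c unique_digits
            else c]) [])

def pv_attempt_loop (next_phrase : List Char) (phrases : List String) (s : String) (attempts : Nat) : String :=
  if h : s ∈ phrases ∧ attempts < 10 then
    pv_attempt_loop next_phrase phrases (pv_skip_characters (String.ofList next_phrase) phrases) (attempts + 1)
  else s
termination_by 10 - attempts
decreasing_by omega

def generate_next_phrase (phrases : List String) (logic : Int) : String :=
  match phrases with
  | [] => ""
  | _ =>
    let base := phrases.headD ""
    let cs := base.toList
    let next_phrase := (List.range cs.length).foldl (fun acc i => acc ++ [cs.getD i ' ']) []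
    let s := pv_skip_characters (String.ofList next_phrase) phrases
    pv_attempt_loop next_phrase phrases s 0

-- ===== PORT B =====
def pv_table_next (c : Char) (u : List Char) : Char :=
  (PySem.Dict.ofList (u.zip (u.drop 1 ++ u.take 1))).getD c c

def pv_col_next (c : Char) (col : List Char) : Char :=
  if PySem.Chars.isalpha c then
    pv_table_next c (PySem.List.sorted (PySem.Set.ofList (col.filter (fun ch => PySem.Chars.isalpha ch))) (fun x => x) false)
  else if PySem.Chars.isdigit c then
    pv_table_next c (PySem.List.sorted (PySem.Set.ofList (col.filter (fun ch => PySem.Chars.isdigit ch))) (fun x => x) false)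
  else c

def generate_next_phrase_alt (phrases : List String) (logic : Int) : String :=
  match phrases with
  | [] => ""
  | base :: _ =>
    let columns := phrases.foldl (fun d p =>
      (PySem.List.enumerate p.toList 0).foldl
        (fun d ic => d.modify ic.1 ([] : List Char) (· ++ [ic.2])) d)
      (PySem.Dict.empty : PySem.Dict Int (List Char))
    String.ofList ((PySem.List.enumerate base.toList 0).foldl (fun acc ic =>
      acc ++ [pv_col_next ic.2 (columns.getD ic.1 [])]) [])

-- ===== PRECONDITION & SPEC =====
def Spec_generate_next_phrase (phrases : List String) (logic : Int) (out : String) : Prop := out = generate_next_phrase_alt phrases logic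
instance (phrases : List String) (logic : Int) (out : String) : Decidable (Spec_generate_next_phrase phrases logic out) := by unfold Spec_generate_next_phrase; infer_instance

-- ===== CLAIM (what is proved, stated in full; the proofs are below) =====
def Claim_equal_generate_next_phrase : Prop := ∀ (phrases : List String) (logic : Int), Dom_generate_next_phrase phrases logic → Spec_generate_next_phrase phrases logic (generate_next_phrase phrases logic)

-- ===== LEMMAS AND PROOFS =====

-- A's retry loop never changes the string it is given (the recomputation is identical).
theorem pv_attempt_loop_fix (np : List Char) (phrases : List String) (n : Nat) :
    pv_attempt_loop np phrases (pv_skip_characters (String.ofList np) phrases) n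
      = pv_skip_characters (String.ofList np) phrases := by
  suffices H : ∀ k n, 10 - n ≤ k →
      pv_attempt_loop np phrases (pv_skip_characters (String.ofList np) phrases) n
        = pv_skip_characters (String.ofList np) phrases from H 10 n (by omega)
  intro k
  induction k with
  | zero =>
    intro n hn
    rw [pv_attempt_loop, dif_neg]
    rintro ⟨-, h2⟩; omega
  | succ k ih =>
    intro n hn
    rw [pv_attempt_loop]
    split
    · exact ih (n + 1) (by omega)
    · rfl

-- A's placeholder loop rebuilds the base string character by character.
theorem pv_rebuild (cs : List Char) :
    (List.range cs.length).foldl (fun acc i => acc ++ [cs.getD i ' ']) [] = cs := by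
  rw [PySem.List.foldl_append_singleton_eq_map]
  apply List.ext_getElem (by simp)
  intro i h1 h2
  simp [List.getD_eq_getElem?_getD, List.getElem?_eq_getElem h2]

-- the filtered enumeration of one phrase at a fixed column, offset form
theorem pv_enum_filter (cs : List Char) (s : Int) (q : Nat) :
    ((PySem.List.enumerate cs s).filter (fun ic => ic.1 == s + (q : Int))).map (·.2)
      = if q < cs.length then [cs.getD q ' '] else [] := by
  induction cs generalizing s q with
  | nil => simp [PySem.List.enumerate_nil]
  | cons c cs ih =>
    rw [PySem.List.enumerate_cons]
    rcases q with _ | q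
    · simp only [Nat.cast_zero, add_zero, List.filter_cons, beq_self_eq_true, if_pos trivial]
      have hempty : (PySem.List.enumerate cs (s + 1)).filter (fun ic => ic.1 == s) = [] := by
        rw [List.filter_eq_nil_iff]
        intro ic hm
        rw [PySem.List.mem_enumerate_iff] at hm
        obtain ⟨k, hk, rfl⟩ := hm
        simp; omega
      simp [hempty]
    · have hne : (s == s + (((q : Nat) + 1 : Nat) : Int)) = false := by simp; omega
      simp only [List.filter_cons, hne, if_neg Bool.false_ne_true]
      rw [show s + (((q : Nat) + 1 : Nat) : Int) = (s + 1) + (q : Int) by push_cast; ring]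
      rw [ih (s + 1) q]
      simp

-- B's column dict holds exactly A's chars_at_index list
theorem pv_columns_getD (phrases : List String) (d : PySem.Dict Int (List Char)) (q : Nat) :
    (phrases.foldl (fun d p =>
        (PySem.List.enumerate p.toList 0).foldl
          (fun d ic => d.modify ic.1 ([] : List Char) (· ++ [ic.2])) d) d).getD (q : Int) []
      = d.getD (q : Int) []
        ++ phrases.flatMap (fun p => if q < p.toList.length then [p.toList.getD q ' '] else []) := by
  induction phrases generalizing d with
  | nil => simp
  | cons p ps ih =>
    simp only [List.foldl_cons, List.flatMap_cons]
    rw [ih, PySem.Dict.getD_foldl_modify_append]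
    rw [show (q : Int) = 0 + (q : Int) by ring]
    rw [pv_enum_filter p.toList 0 q]
    simp [List.append_assoc]

-- B's zip-rotate table lookup is A's (index+1) mod len successor, for nodup u with c ∈ u
theorem pv_table_next_eq (c : Char) (u : List Char) (hnd : u.Nodup) (hc : c ∈ u) :
    pv_table_next c u
      = (PySem.List.pyGet? u (PySem.Int.mod ((u.idxOf c : Int) + 1) (u.length : Int))).getD c := by
  unfold pv_table_next
  have hj : u.idxOf c < u.length := List.idxOf_lt_length_of_mem hc
  have hcj : u[u.idxOf c]? = some c := by
    rw [List.getElem?_eq_getElem hj, List.getElem_idxOf hj]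
  generalize hJ : u.idxOf c = j at hj hcj ⊢
  obtain ⟨r, hr⟩ : ∃ r, u.drop 1 ++ u.take 1 = r := ⟨_, rfl⟩
  have hlenr : r.length = u.length := by rw [← hr]; simp; omega
  have hpos : 0 < u.length := by omega
  obtain ⟨v, hv⟩ : ∃ v, r[j]? = some v := by
    rw [List.getElem?_eq_getElem (by omega)]; exact ⟨_, rfl⟩
  have hitems : (PySem.Dict.ofList (u.zip r)).items = u.zip r := by
    show (List.foldl (fun acc p => acc.insert p.1 p.2) (PySem.Dict.empty : PySem.Dict Char Char) (u.zip r)).items = u.zip r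
    have := PySem.Dict.items_foldl_insert_fresh (u.zip r) Prod.fst Prod.snd
      (PySem.Dict.empty : PySem.Dict Char Char)
      (by intro a _; simp) (by rw [List.map_fst_zip (by omega)]; exact hnd)
    simpa using this
  have hkeys : (PySem.Dict.ofList (u.zip r)).keys.Nodup := by
    show ((PySem.Dict.ofList (u.zip r)).items.map (·.1)).Nodup
    rw [hitems, show ((u.zip r).map (·.1)) = List.map Prod.fst (u.zip r) from rfl,
      List.map_fst_zip (by omega)]
    exact hnd
  have hmem : (c, v) ∈ u.zip r := by
    have hz : (u.zip r)[j]? = some (c, v) := by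
      rw [List.getElem?_zip_eq_some]; exact ⟨hcj, hv⟩
    exact List.mem_of_getElem? hz
  have hget : (PySem.Dict.ofList (u.zip r)).get? c = some v :=
    PySem.Dict.get?_of_mem_items _ (by rw [hitems]; exact hmem) hkeys
  rw [hr, PySem.Dict.getD_eq_get?_getD, hget]
  by_cases hlast : j + 1 < u.length
  · have hmod : PySem.Int.mod ((j : Int) + 1) (u.length : Int) = ((j + 1 : Nat) : Int) := by
      rw [PySem.Int.mod_eq_emod_of_pos (by exact_mod_cast hpos)]
      rw [Int.emod_eq_of_lt (by positivity) (by exact_mod_cast hlast)]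
      push_cast; ring
    rw [hmod, PySem.List.pyGet?_natCast]
    have hru : r[j]? = u[j + 1]? := by
      rw [← hr] at hv ⊢
      rw [List.getElem?_append_left (by simp; omega), List.getElem?_drop]
      congr 1; omega
    rw [← hru, hv]
  · have hmod : PySem.Int.mod ((j : Int) + 1) (u.length : Int) = ((0 : Nat) : Int) := by
      rw [PySem.Int.mod_eq_emod_of_pos (by exact_mod_cast hpos)]
      rw [show ((j : Int) + 1) = (u.length : Int) by omega]
      simp
    rw [hmod, PySem.List.pyGet?_natCast]
    have hru : r[j]? = u[0]? := by
      rw [← hr]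
      rw [List.getElem?_append_right (by simp; omega)]
      have hj' : j - (u.drop 1).length = 0 := by simp; omega
      rw [hj', List.getElem?_take_of_lt (by omega)]
    rw [← hru, hv]

-- per-column equality of the two branch computations when c occurs in the column
theorem pv_col_next_eq (c : Char) (col : List Char) (hc : c ∈ col) :
    pv_col_next c col
      = (if PySem.Chars.isalpha c then
           pv_get_next_char c (PySem.List.sorted (PySem.Set.ofList (col.filter (fun ch => PySem.Chars.isalpha ch))) (fun x => x) false)
         else if PySem.Chars.isdigit c then
           pv_get_next_digit c (PySem.List.sorted (PySem.Set.ofList (col.filter (fun ch => PySem.Chars.isdigit ch))) (fun x => x) false)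
         else c) := by
  have key : ∀ (pred : Char → Bool), pred c = true →
      pv_table_next c (PySem.List.sorted (PySem.Set.ofList (col.filter (fun ch => pred ch))) (fun x => x) false)
        = (if c ∈ PySem.List.sorted (PySem.Set.ofList (col.filter (fun ch => pred ch))) (fun x => x) false then
            match PySem.List.index? (PySem.List.sorted (PySem.Set.ofList (col.filter (fun ch => pred ch))) (fun x => x) false) c with
            | some ci => (PySem.List.pyGet? (PySem.List.sorted (PySem.Set.ofList (col.filter (fun ch => pred ch))) (fun x => x) false)
                (PySem.Int.mod ((ci : Int) + 1) ((PySem.List.sorted (PySem.Set.ofList (col.filter (fun ch => pred ch))) (fun x => x) false).length : Int))).getD c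
            | none => c
          else c) := by
    intro pred hp
    obtain ⟨u, hu⟩ : ∃ u, PySem.List.sorted (PySem.Set.ofList (col.filter (fun ch => pred ch))) (fun x => x) false = u := ⟨_, rfl⟩
    rw [hu]
    have hcu : c ∈ u := by
      rw [← hu, PySem.List.mem_sorted, PySem.Set.mem_ofList]
      exact List.mem_filter.mpr ⟨hc, hp⟩
    have hnd : u.Nodup := by
      rw [← hu]
      exact (PySem.List.sorted_perm _ _ _).symm.nodup (PySem.Set.nodup_ofList _)
    have hidx : PySem.List.index? u c = some (u.idxOf c) := by
      rw [PySem.List.index?_eq_idxOf?]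
      obtain ⟨i, hi⟩ := Option.isSome_iff_exists.mp (List.isSome_idxOf?.mpr hcu)
      rw [hi, List.idxOf_eq_getD_idxOf?, hi]; rfl
    rw [if_pos hcu, hidx]
    exact pv_table_next_eq c u hnd hcu
  unfold pv_col_next pv_get_next_char pv_get_next_digit
  split
  case isTrue ha => exact key _ ha
  case isFalse ha =>
    split
    case isTrue hd => exact key _ hd
    case isFalse hd => rfl

-- ===== VERDICT (by name: the statement is the Claim_ definition above) =====
theorem generate_next_phrase_spec : Claim_equal_generate_next_phrase := by
  intro phrases logic _
  unfold Spec_generate_next_phrase generate_next_phrase generate_next_phrase_alt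
  cases phrases with
  | nil => rfl
  | cons base rest =>
    simp only [List.headD_cons, pv_rebuild, pv_attempt_loop_fix]
    unfold pv_skip_characters
    simp only [String.toList_ofList, PySem.List.foldl_append_singleton_eq_map]
    congr 1
    apply List.ext_getElem (by simp [PySem.List.length_enumerate])
    intro k h1 h2
    have hk : k < base.toList.length := by
      simpa [PySem.List.length_enumerate] using h2
    simp only [List.nil_append, List.getElem_map, List.getElem_range, PySem.List.getElem_enumerate,
      zero_add]
    rw [pv_columns_getD (base :: rest) PySem.Dict.empty k]
    simp only [PySem.Dict.getD_empty, List.nil_append]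
    have hmem : base.toList[k] ∈
        (base :: rest).flatMap (fun p => if k < p.toList.length then [p.toList.getD k ' '] else []) := by
      apply List.mem_flatMap.mpr
      exact ⟨base, List.mem_cons_self, by
        rw [if_pos hk]
        simp [List.getD_eq_getElem?_getD, List.getElem?_eq_getElem hk]⟩
    rw [pv_col_next_eq _ _ hmem]
    simp [List.getD_eq_getElem?_getD, List.getElem?_eq_getElem hk]
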